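-- pv_equiv track=rewrite | github.com/makemyway-kr/cote | programmers/Solved with python/editingtable/edit2.py | solution
-- ===== SOURCE A (Python) =====
-- def solution(n, k, cmd):
--     #n은 전체 행 개수,k는 현재 선택 행 번호
--     answer = ['O'for i in range(n)]
--     undeleted=[i for i in range(0,n)]
--     deleted=[]
--     curr=k
--     for command in cmd:
--         c=command.split(' ')
--         if c[0]=='U' or c[0]=='D':
--             if c[0]=='U':
--                 curr-=int(c[1])
--             else:
--                 curr+=int(c[1])
--         elif c[0]=='C':
--             answer[undeleted[curr]]='X'
--             deleted.append([undeleted[curr],curr])#내용,위치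
--             undeleted.pop(curr)
--             if curr==len(undeleted):
--                 curr=len(undeleted)-1
--         elif c[0]=='Z':
--             temp=deleted.pop()
--             undeleted.insert(temp[1],temp[0])
--             answer[temp[0]]='O'
--             if temp[0]<=curr:#현재 위치 보다 앞에 복구가되면 인덱스가 하나 밀려야 맞음.
--                 curr+=1
--     return ''.join(answer)
-- ===== SOURCE B (Python) =====
-- def kth_alive(alive, target):
--     # index of the target-th (0-based) still-alive row; IndexError if the cursor is outside the table
--     seen = -1
--     for i in range(len(alive)):
--         if alive[i]:
--             seen += 1
--             if seen == target:
--                 return i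
--     raise IndexError('cursor outside the table')
--
--
-- def solution(n, k, cmd):
--     # B: keep a boolean alive-flag per row plus a stack of removed row numbers,
--     # instead of A's explicit list of remaining rows with pop/insert.
--     alive = [True] * n
--     removed = []
--     curr = k
--     cnt = len(alive)
--     for command in cmd:
--         c = command.split(' ')
--         if c[0] == 'U':
--             curr -= int(c[1])
--         elif c[0] == 'D':
--             curr += int(c[1])
--         elif c[0] == 'C':
--             row = kth_alive(alive, curr)
--             alive[row] = False
--             removed.append(row)
--             cnt -= 1
--             if curr == cnt:
--                 curr = cnt - 1
--         elif c[0] == 'Z':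
--             row = removed.pop()
--             alive[row] = True
--             cnt += 1
--             if row <= curr:
--                 curr += 1
--     return ''.join('O' if a else 'X' for a in alive)
-- ===== Notes on version B (the rewrite author's own statement) =====
-- stated objective: alternative
-- what changed: B replaces A's explicit list of surviving row numbers (mutated with pop/insert and indexed by cursor) by a per-row boolean alive flag plus a stack of removed row numbers: delete/restore flip one flag, the cursor row is found by scanning the flags, and the output is rendered from the flags instead of being patched entry by entry.
-- outside the precondition, e.g. on solution(2, 0, ['U 1', 'C']): A returns 'OX', B raises IndexError
import Mathlib
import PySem

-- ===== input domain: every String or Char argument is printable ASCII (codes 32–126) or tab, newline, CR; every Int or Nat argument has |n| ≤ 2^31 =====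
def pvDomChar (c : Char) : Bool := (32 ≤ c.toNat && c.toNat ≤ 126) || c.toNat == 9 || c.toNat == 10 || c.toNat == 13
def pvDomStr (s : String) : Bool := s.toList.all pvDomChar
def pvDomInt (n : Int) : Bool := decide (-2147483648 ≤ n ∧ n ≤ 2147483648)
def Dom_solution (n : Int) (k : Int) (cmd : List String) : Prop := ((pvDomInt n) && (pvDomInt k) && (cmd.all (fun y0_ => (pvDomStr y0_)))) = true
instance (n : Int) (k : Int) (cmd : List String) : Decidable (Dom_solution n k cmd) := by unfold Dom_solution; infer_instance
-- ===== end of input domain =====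

-- B keeps a per-row alive flag and a stack of removed row numbers instead of A's
-- list of surviving rows with pop/insert; same cost class, different structure.

-- ===== PORT A =====
-- one loop iteration of A: state (answer, undeleted, deleted, curr)
def solAStep (st : List String × List Int × List (Int × Int) × Int) (command : String) :
    List String × List Int × List (Int × Int) × Int :=
  let answer := st.1
  let undeleted := st.2.1
  let deleted := st.2.2.1
  let curr := st.2.2.2
  let c := (PySem.Str.split? command " ").getD []   -- split(' '): sep ≠ "" so always some
  let c0 := PySem.List.pyGetD c 0 ""
  if c0 = "U" ∨ c0 = "D" then
    -- int(c[1]): raises outside Pre_solution, where the default is never used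
    let v := (PySem.Int.ofStr? (PySem.List.pyGetD c 1 "")).getD 0
    if c0 = "U" then (answer, undeleted, deleted, curr - v)
    else (answer, undeleted, deleted, curr + v)
  else if c0 = "C" then
    -- undeleted[curr] / undeleted.pop(curr): raise outside Pre_solution
    let x := PySem.List.pyGetD undeleted curr 0
    let answer' := PySem.List.pySetD answer x "X"
    let deleted' := deleted ++ [(x, curr)]
    let undeleted' := ((PySem.List.pop? undeleted curr).map (·.2)).getD undeleted
    let curr' := if curr = (undeleted'.length : Int) then (undeleted'.length : Int) - 1 else curr
    (answer', undeleted', deleted', curr')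
  else if c0 = "Z" then
    -- deleted.pop(): raises outside Pre_solution
    match PySem.List.pop? deleted (-1) with
    | none => (answer, undeleted, deleted, curr)
    | some (temp, deleted') =>
      let undeleted' := PySem.List.insert undeleted temp.2 temp.1
      let answer' := PySem.List.pySetD answer temp.1 "O"
      let curr' := if temp.1 ≤ curr then curr + 1 else curr
      (answer', undeleted', deleted', curr')
  else (answer, undeleted, deleted, curr)

def solution (n : Int) (k : Int) (cmd : List String) : String :=
  let answer := (PySem.List.pyRange 0 n 1).map (fun _ => "O")
  let undeleted := PySem.List.pyRange 0 n 1
  let st := cmd.foldl solAStep (answer, undeleted, [], k)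
  PySem.Str.join "" st.1

-- ===== PORT B =====
-- kth_alive: scan with a seen-counter; none = IndexError (outside Pre_solution)
def kthAlive (i : Int) (seen : Int) (target : Int) : List Bool → Option Int
  | [] => none
  | b :: rest =>
    if b then
      if seen + 1 = target then some i else kthAlive (i + 1) (seen + 1) target rest
    else kthAlive (i + 1) seen target rest

-- one loop iteration of B: state (alive, removed, curr, cnt)
def solBStep (st : List Bool × List Int × Int × Int) (command : String) :
    List Bool × List Int × Int × Int :=
  let alive := st.1
  let removed := st.2.1
  let curr := st.2.2.1
  let cnt := st.2.2.2
  let c := (PySem.Str.split? command " ").getD []   -- split(' '): sep ≠ "" so always some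
  let c0 := PySem.List.pyGetD c 0 ""
  if c0 = "U" then
    (alive, removed, curr - (PySem.Int.ofStr? (PySem.List.pyGetD c 1 "")).getD 0, cnt)
  else if c0 = "D" then
    (alive, removed, curr + (PySem.Int.ofStr? (PySem.List.pyGetD c 1 "")).getD 0, cnt)
  else if c0 = "C" then
    match kthAlive 0 (-1) curr alive with
    | none => (alive, removed, curr, cnt)   -- IndexError, outside Pre_solution
    | some row =>
      let alive' := PySem.List.pySetD alive row false
      let removed' := removed ++ [row]
      let cnt' := cnt - 1
      let curr' := if curr = cnt' then cnt' - 1 else curr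
      (alive', removed', curr', cnt')
  else if c0 = "Z" then
    match removed.getLast? with
    | none => (alive, removed, curr, cnt)   -- pop from empty list, outside Pre_solution
    | some row =>
      let removed' := removed.dropLast
      let alive' := PySem.List.pySetD alive row true
      let cnt' := cnt + 1
      let curr' := if row ≤ curr then curr + 1 else curr
      (alive', removed', curr', cnt')
  else (alive, removed, curr, cnt)

def solution_alt (n : Int) (k : Int) (cmd : List String) : String :=
  let alive := List.replicate n.toNat true
  let st := cmd.foldl solBStep (alive, [], k, (alive.length : Int))
  PySem.Str.join "" (st.1.map (fun a => if a then "O" else "X"))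

-- ===== PRECONDITION & SPEC =====
-- Validity of a command trace is history-dependent (each command's legality depends on the
-- cursor/table state the previous commands produced), so Pre_ necessarily replays that state
-- machine; it only checks well-formedness and computes no output.
-- Pre_ excludes traces where a C command is reached with a negative (or too large) cursor:
-- there A still returns via Python's negative-index wraparound, an accident of its list
-- representation, while B's cursor scan raises IndexError.
-- the row number of the curr-th remaining row: start at curr and skip over the removed
-- rows, scanned in increasing order
def skipUp : Int → List Int → Int
  | x, [] => x
  | x, r :: rest => skipUp (if r ≤ x then x + 1 else x) rest

def preOk (curr : Int) (cnt : Int) (rem : List Int) : List String → Bool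
  | [] => true
  | command :: rest =>
    let c := (PySem.Str.split? command " ").getD []   -- split(' '): sep ≠ "" so always some
    let c0 := PySem.List.pyGetD c 0 ""
    if c0 = "U" ∨ c0 = "D" then
      match PySem.List.pyGet? c 1 with
      | none => false
      | some s =>
        match PySem.Int.ofStr? s with
        | none => false
        | some v => preOk (if c0 = "U" then curr - v else curr + v) cnt rem rest
    else if c0 = "C" then
      if 0 ≤ curr ∧ curr < cnt then
        let row := skipUp curr (PySem.List.sorted rem (fun x => x) false)
        preOk (if curr = cnt - 1 then cnt - 1 - 1 else curr) (cnt - 1) (rem ++ [row]) rest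
      else false
    else if c0 = "Z" then
      match rem.getLast? with
      | none => false
      | some row => preOk (if row ≤ curr then curr + 1 else curr) (cnt + 1) rem.dropLast rest
    else preOk curr cnt rem rest

def Pre_solution (n : Int) (k : Int) (cmd : List String) : Prop :=
  preOk k ((n.toNat : Nat) : Int) [] cmd = true

instance (n : Int) (k : Int) (cmd : List String) : Decidable (Pre_solution n k cmd) := by
  unfold Pre_solution; infer_instance

def pvWitness_solution : Int × Int × List String := (4, 1, ["D 2", "C", "C", "U 1", "Z", "Z", "C"])

def Spec_solution (n : Int) (k : Int) (cmd : List String) (out : String) : Prop := out = solution_alt n k cmd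
instance (n : Int) (k : Int) (cmd : List String) (out : String) : Decidable (Spec_solution n k cmd out) := by unfold Spec_solution; infer_instance

-- ===== CLAIM (what is proved, stated in full; the proofs are below) =====
def Claim_equal_solution : Prop := ∀ (n : Int) (k : Int) (cmd : List String), Dom_solution n k cmd → Pre_solution n k cmd → Spec_solution n k cmd (solution n k cmd)

-- ===== LEMMAS AND PROOFS =====

-- the row numbers (0-based) of the rows still alive, in increasing order
def aliveNat : List Bool → List Nat
  | [] => []
  | b :: rest => if b then 0 :: (aliveNat rest).map (· + 1) else (aliveNat rest).map (· + 1)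


-- the LIFO stack invariant: each entry (row, position) of the reversed deleted stack is a
-- currently-dead row whose stored position is its rank among the currently alive rows
def StackInvR : List Bool → List (Int × Int) → Prop
  | _, [] => True
  | alive, (v, p) :: rest =>
      0 ≤ v ∧ v.toNat < alive.length ∧ alive[v.toNat]? = some false ∧
      p = (((alive.take v.toNat).count true : Nat) : Int) ∧
      StackInvR (alive.set v.toNat true) rest

-- the full relation between A's and B's loop states
def SimRel (a : List String × List Int × List (Int × Int) × Int)
    (b : List Bool × List Int × Int × Int) : Prop :=
  a.1 = b.1.map (fun x => if x then "O" else "X") ∧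
  a.2.1 = (aliveNat b.1).map (fun (m : Nat) => (m : Int)) ∧
  a.2.2.1.map (·.1) = b.2.1 ∧
  a.2.2.2 = b.2.2.1 ∧
  b.2.2.2 = ((aliveNat b.1).length : Int) ∧
  StackInvR b.1 a.2.2.1.reverse ∧
  (∀ i : Nat, i < b.1.length → ((b.1[i]? = some false) ↔ ((i : Nat) : Int) ∈ b.2.1)) ∧
  b.2.1.Nodup ∧
  (∀ r ∈ b.2.1, 0 ≤ r)






theorem aliveNat_mem_lt (l : List Bool) (x : Nat) (hx : x ∈ aliveNat l) :
    x < l.length ∧ l[x]? = some true := by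
  induction l generalizing x with
  | nil => simp [aliveNat] at hx
  | cons b rest ih =>
    cases b
    · simp only [aliveNat, Bool.false_eq_true, if_false, List.mem_map] at hx
      obtain ⟨y, hy, rfl⟩ := hx
      obtain ⟨h1, h2⟩ := ih y hy
      exact ⟨by simpa using h1, by simpa using h2⟩
    · simp only [aliveNat, if_true, List.mem_cons, List.mem_map] at hx
      rcases hx with rfl | ⟨y, hy, rfl⟩
      · simp
      · obtain ⟨h1, h2⟩ := ih y hy
        exact ⟨by simpa using h1, by simpa using h2⟩

theorem aliveNat_count_take (l : List Bool) (j : Nat) (h : j < (aliveNat l).length) :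
    (l.take (aliveNat l)[j]).count true = j := by
  induction l generalizing j with
  | nil => simp [aliveNat] at h
  | cons b rest ih =>
    cases b
    · simp only [aliveNat, Bool.false_eq_true, if_false, List.length_map] at h
      have := ih j h
      simp [aliveNat, List.getElem_map, h, List.count_cons, this]
    · match j with
      | 0 => simp [aliveNat]
      | j + 1 =>
        simp only [aliveNat, if_true, List.length_cons, List.length_map] at h
        have hj : j < (aliveNat rest).length := by omega
        have := ih j hj
        simp [aliveNat, List.count_cons, this]

theorem aliveNat_set_false (l : List Bool) (j : Nat) (h : j < (aliveNat l).length) :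
    aliveNat (l.set (aliveNat l)[j] false) = (aliveNat l).eraseIdx j := by
  induction l generalizing j with
  | nil => simp [aliveNat] at h
  | cons b rest ih =>
    cases b
    · simp only [aliveNat, Bool.false_eq_true, if_false, List.length_map] at h ⊢
      have := ih j h
      simp [aliveNat, List.set_cons_succ, this, List.eraseIdx_map]
    · match j with
      | 0 => simp [aliveNat]
      | j + 1 =>
        simp only [aliveNat, if_true, List.length_cons, List.length_map] at h
        have hj : j < (aliveNat rest).length := by omega
        have := ih j hj
        simp [aliveNat, List.set_cons_succ, this, List.eraseIdx_map]

theorem aliveNat_set_true (l : List Bool) (v : Nat) (hv : v < l.length)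
    (hf : l[v]? = some false) :
    aliveNat (l.set v true) =
      (aliveNat l).take ((l.take v).count true) ++ v :: (aliveNat l).drop ((l.take v).count true) := by
  induction l generalizing v with
  | nil => simp at hv
  | cons b rest ih =>
    match v with
    | 0 =>
      simp only [List.getElem?_cons_zero, Option.some.injEq] at hf
      subst hf
      simp [aliveNat]
    | v + 1 =>
      have hv' : v < rest.length := by simpa using hv
      have hf' : rest[v]? = some false := by simpa using hf
      have := ih v hv' hf'
      cases b
      · simp [aliveNat, List.set_cons_succ, this, List.count_cons, List.map_take, List.map_drop]
      · simp [aliveNat, List.set_cons_succ, this, List.count_cons, List.map_take, List.map_drop]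

theorem kthAlive_spec (l : List Bool) (i seen : Int) (j : Nat) (h : j < (aliveNat l).length) :
    kthAlive i seen (seen + 1 + (j : Int)) l = some (i + ((aliveNat l)[j] : Int)) := by
  induction l generalizing i seen j with
  | nil => simp [aliveNat] at h
  | cons b rest ih =>
    cases b
    · simp only [aliveNat, Bool.false_eq_true, if_false, List.length_map] at h
      have := ih (i + 1) seen j h
      simp only [kthAlive, Bool.false_eq_true, if_false, this, aliveNat]
      simp [List.getElem_map, h]
      push_cast
      ring
    · match j with
      | 0 =>
        simp [kthAlive, aliveNat]
      | j + 1 =>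
        simp only [aliveNat, if_true, List.length_cons, List.length_map] at h
        have hj : j < (aliveNat rest).length := by omega
        have := ih (i + 1) (seen + 1) j hj
        have harg : seen + 1 + ((j:Int) + 1) = (seen + 1) + 1 + (j:Int) := by ring
        simp only [kthAlive, if_true]
        rw [if_neg (by omega)]
        push_cast
        rw [harg, this]
        simp [aliveNat, List.getElem_map, hj]
        push_cast
        ring

theorem aliveNat_replicate (m : Nat) : aliveNat (List.replicate m true) = List.range m := by
  induction m with
  | zero => simp [aliveNat]
  | succ m ih =>
    rw [List.replicate_succ, List.range_succ_eq_map]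
    simp [aliveNat, ih]

theorem take_set {α : Type} (l : List α) (i : Nat) (a : α) : (l.set i a).take i = l.take i := by
  induction l generalizing i with
  | nil => simp
  | cons x t ih =>
    match i with
    | 0 => simp
    | i + 1 => simp [List.set_cons_succ, ih]

theorem set_of_getElem? {α : Type} (l : List α) (i : Nat) (a : α) (h : l[i]? = some a) :
    l.set i a = l := by
  induction l generalizing i with
  | nil => simp at h
  | cons x t ih =>
    match i with
    | 0 => simp at h; simp [h]
    | i + 1 =>
      simp only [List.getElem?_cons_succ] at h
      simp [List.set_cons_succ, ih i h]

theorem aliveNat_length (l : List Bool) : (aliveNat l).length = l.count true := by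
  induction l with
  | nil => simp [aliveNat]
  | cons b rest ih =>
    cases b <;> simp [aliveNat, ih, List.count_cons]

theorem pyGetD_of_pyGet? {α : Type} (xs : List α) (i : Int) (d v : α)
    (h : PySem.List.pyGet? xs i = some v) : PySem.List.pyGetD xs i d = v := by
  unfold PySem.List.pyGetD
  rw [h]
  rfl

theorem skipUp_stay (S : List Int) (x : Int) (h : ∀ r ∈ S, ¬ r ≤ x) : skipUp x S = x := by
  induction S with
  | nil => rfl
  | cons r rest ih =>
    simp only [skipUp, if_neg (h r (by simp))]
    exact ih (fun r' hr' => h r' (by simp [hr']))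

theorem skipUp_shift (S : List Int) (x : Int) :
    skipUp (x + 1) (S.map (· + 1)) = skipUp x S + 1 := by
  induction S generalizing x with
  | nil => rfl
  | cons r rest ih =>
    simp only [List.map_cons, skipUp]
    by_cases hr : r ≤ x
    · rw [if_pos (by omega), if_pos hr]
      exact ih (x + 1)
    · rw [if_neg (by omega), if_neg hr]
      exact ih x

theorem pairwise_lt_of_le_nodup (S : List Int) (hle : S.Pairwise (· ≤ ·)) (hnd : S.Nodup) :
    S.Pairwise (· < ·) :=
  (hle.and hnd).imp (fun h => lt_of_le_of_ne h.1 h.2)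

theorem map_sub_add (S : List Int) : (S.map (· - 1)).map (· + 1) = S := by
  rw [List.map_map]
  conv_rhs => rw [← List.map_id S]
  exact List.map_congr_left (fun r _ => by simp only [Function.comp_apply, id_eq]; ring)

theorem skipUp_avail (alive : List Bool) (S : List Int)
    (hpw : S.Pairwise (· < ·))
    (hmem : ∀ i : Nat, i < alive.length → ((alive[i]? = some false) ↔ ((i : Nat) : Int) ∈ S))
    (hpos : ∀ r ∈ S, 0 ≤ r)
    (j : Nat) (hj : j < (aliveNat alive).length) :
    skipUp (j : Int) S = (((aliveNat alive)[j] : Nat) : Int) := by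
  induction alive generalizing S j with
  | nil => simp [aliveNat] at hj
  | cons b rest ih =>
    cases b
    · -- head row removed: S starts with 0
      have hj0 : j < (aliveNat rest).length := by simpa [aliveNat] using hj
      simp only [aliveNat, Bool.false_eq_true, if_false, List.getElem_map]
      have h0 : (0 : Int) ∈ S := (hmem 0 (by simp)).mp (by simp)
      match S, hpw with
      | s0 :: S0, hpw =>
        have hs0 : s0 = 0 := by
          rcases List.mem_cons.mp h0 with h | h
          · omega
          · have h1 := (List.pairwise_cons.mp hpw).1 0 h
            have h2 := hpos s0 (by simp)
            omega
        subst hs0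
        have hS0pos : ∀ r ∈ S0, 1 ≤ r := by
          intro r hr
          have := (List.pairwise_cons.mp hpw).1 r hr
          omega
        have hmem0 : ∀ i : Nat, i < rest.length →
            ((rest[i]? = some false) ↔ ((i : Nat) : Int) ∈ S0.map (· - 1)) := by
          intro i hi
          have hm := hmem (i + 1) (by simpa using Nat.succ_lt_succ hi)
          simp only [List.getElem?_cons_succ] at hm
          rw [hm]
          simp only [List.mem_cons, List.mem_map]
          constructor
          · rintro (h | h)
            · exfalso
              omega
            · exact ⟨_, h, by push_cast; ring⟩
          · rintro ⟨r, hr, hre⟩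
            right
            have hre' : r = ((i : Nat) : Int) + 1 := by omega
            subst hre'
            have hcast : (((i + 1 : Nat)) : Int) = ((i : Nat) : Int) + 1 := by push_cast; ring
            rw [hcast]
            exact hr
        have hpw0 : (S0.map (· - 1)).Pairwise (· < ·) :=
          ((List.pairwise_cons.mp hpw).2).map _ (fun h => by omega)
        have hpos0 : ∀ r ∈ S0.map (· - 1), 0 ≤ r := by
          intro r hr
          obtain ⟨r', hr', rfl⟩ := List.mem_map.mp hr
          have := hS0pos r' hr'
          omega
        have hrec := ih (S0.map (· - 1)) hpw0 hmem0 hpos0 j hj0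
        have hstep : skipUp ((j : Nat) : Int) ((0 : Int) :: S0) = skipUp (((j : Nat) : Int) + 1) S0 := by
          simp [skipUp, show (0 : Int) ≤ ((j : Nat) : Int) by positivity]
        rw [hstep, ← map_sub_add S0, skipUp_shift, hrec]
        push_cast
        ring
    · -- head row alive: 0 ∉ S
      have h0 : (0 : Int) ∉ S := by
        intro h
        have := (hmem 0 (by simp)).mpr h
        simp at this
      have hS1 : ∀ r ∈ S, 1 ≤ r := by
        intro r hr
        have h1 := hpos r hr
        rcases eq_or_lt_of_le h1 with h | h
        · exact absurd (h ▸ hr) h0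
        · omega
      match j with
      | 0 =>
        simp only [aliveNat, if_true, List.getElem_cons_zero]
        exact skipUp_stay S _ (fun r hr => by have := hS1 r hr; push_cast; omega)
      | j + 1 =>
        have hj' : j < (aliveNat rest).length := by
          simpa [aliveNat] using hj
        simp only [aliveNat, if_true, List.getElem_cons_succ, List.getElem_map]
        have hmem' : ∀ i : Nat, i < rest.length →
            ((rest[i]? = some false) ↔ ((i : Nat) : Int) ∈ S.map (· - 1)) := by
          intro i hi
          have hm := hmem (i + 1) (by simpa using Nat.succ_lt_succ hi)
          simp only [List.getElem?_cons_succ] at hm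
          rw [hm]
          simp only [List.mem_map]
          constructor
          · intro h
            exact ⟨_, h, by push_cast; ring⟩
          · rintro ⟨r, hr, hre⟩
            have hre' : r = ((i : Nat) : Int) + 1 := by omega
            subst hre'
            have hcast : (((i + 1 : Nat)) : Int) = ((i : Nat) : Int) + 1 := by push_cast; ring
            rw [hcast]
            exact hr
        have hpw' : (S.map (· - 1)).Pairwise (· < ·) := hpw.map _ (fun h => by omega)
        have hpos' : ∀ r ∈ S.map (· - 1), 0 ≤ r := by
          intro r hr
          obtain ⟨r', hr', rfl⟩ := List.mem_map.mp hr
          have := hS1 r' hr'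
          omega
        have hrec := ih (S.map (· - 1)) hpw' hmem' hpos' j hj'
        rw [show (((j + 1 : Nat)) : Int) = ((j : Nat) : Int) + 1 by push_cast; ring,
          ← map_sub_add S, skipUp_shift, hrec]
        push_cast
        ring

theorem step_rel (a : List String × List Int × List (Int × Int) × Int)
    (b : List Bool × List Int × Int × Int) (command : String) (rest : List String)
    (hrel : SimRel a b) (hpre : preOk b.2.2.1 b.2.2.2 b.2.1 (command :: rest) = true) :
    SimRel (solAStep a command) (solBStep b command) ∧
      preOk (solBStep b command).2.2.1 (solBStep b command).2.2.2 (solBStep b command).2.1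
        rest = true := by
  obtain ⟨ans, und, del, curA⟩ := a
  obtain ⟨alive, rem, curB, cnt⟩ := b
  obtain ⟨h1, h2, h3, h4, h5, h6, h7, h8, h9⟩ := hrel
  simp only at h1 h2 h3 h4 h5 h6 h7 h8 h9
  subst h4
  simp only [preOk] at hpre
  simp only [solAStep, solBStep]
  by_cases hU : PySem.List.pyGetD ((PySem.Str.split? command " ").getD []) 0 "" = "U"
  · -- 'U x'
    simp only [hU] at hpre ⊢
    simp only [String.reduceEq, or_self, if_true, if_false] at hpre ⊢
    rcases hg : PySem.List.pyGet? ((PySem.Str.split? command " ").getD []) 1 with _ | s <;>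
      rw [hg] at hpre <;> simp only [] at hpre
    · exact absurd hpre (by simp)
    · rcases hv : PySem.Int.ofStr? s with _ | v <;> rw [hv] at hpre <;> simp only [] at hpre
      · exact absurd hpre (by simp)
      · rw [pyGetD_of_pyGet? _ _ _ _ hg, hv]
        exact ⟨⟨h1, h2, h3, rfl, h5, h6, h7, h8, h9⟩, hpre⟩
  · by_cases hD : PySem.List.pyGetD ((PySem.Str.split? command " ").getD []) 0 "" = "D"
    · -- 'D x'
      simp only [hD] at hpre ⊢
      simp only [String.reduceEq, or_self, or_true, or_false, if_true, if_false] at hpre ⊢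
      rcases hg : PySem.List.pyGet? ((PySem.Str.split? command " ").getD []) 1 with _ | s <;>
        rw [hg] at hpre <;> simp only [] at hpre
      · exact absurd hpre (by simp)
      · rcases hv : PySem.Int.ofStr? s with _ | v <;> rw [hv] at hpre <;> simp only [] at hpre
        · exact absurd hpre (by simp)
        · rw [pyGetD_of_pyGet? _ _ _ _ hg, hv]
          exact ⟨⟨h1, h2, h3, rfl, h5, h6, h7, h8, h9⟩, hpre⟩
    · have hnUD : ¬(PySem.List.pyGetD ((PySem.Str.split? command " ").getD []) 0 "" = "U" ∨
          PySem.List.pyGetD ((PySem.Str.split? command " ").getD []) 0 "" = "D") := by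
        simp [hU, hD]
      by_cases hC : PySem.List.pyGetD ((PySem.Str.split? command " ").getD []) 0 "" = "C"
      · -- 'C'
        simp only [hC] at hpre ⊢
        simp only [String.reduceEq, or_self, if_true, if_false] at hpre ⊢
        by_cases hcnd : 0 ≤ curA ∧ curA < cnt
        · rw [if_pos hcnd] at hpre
          obtain ⟨hc0, hccnt⟩ := hcnd
          have hclt : curA < ((aliveNat alive).length : Int) := by rw [← h5]; exact hccnt
          have hj : curA.toNat < (aliveNat alive).length := by omega
          have hlen : und.length = (aliveNat alive).length := by rw [h2]; simp
          have hcurA : curA = ((curA.toNat : Nat) : Int) := by omega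
          obtain ⟨v, hv⟩ : ∃ v, (aliveNat alive)[curA.toNat] = v := ⟨_, rfl⟩
          have hvmem : v ∈ aliveNat alive := hv ▸ List.getElem_mem hj
          obtain ⟨hvlt, hvtrue⟩ := aliveNat_mem_lt alive _ hvmem
          -- the row preOk (and B) select is exactly the one A reads off its list
          have hperm := PySem.List.sorted_perm rem (fun x => x) false
          have hrowv : skipUp curA (PySem.List.sorted rem (fun x => x) false) = ((v : Nat) : Int) := by
            conv_lhs => rw [hcurA]
            refine (skipUp_avail alive _ ?_ ?_ ?_ curA.toNat hj).trans (by rw [hv])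
            · exact pairwise_lt_of_le_nodup _ (PySem.List.sorted_pairwise rem (fun x => x))
                (hperm.nodup_iff.mpr h8)
            · intro i hi
              rw [h7 i hi]
              exact (hperm.mem_iff).symm
            · intro r hr
              exact h9 r (hperm.mem_iff.mp hr)
          have hk' : kthAlive 0 (-1) curA alive = some ((v : Nat) : Int) := by
            have hk := kthAlive_spec alive 0 (-1) curA.toNat hj
            rw [hv] at hk
            conv_lhs => rw [hcurA]
            simpa using hk
          have hget : PySem.List.pyGetD und curA 0 = ((v : Nat) : Int) := by
            conv_lhs => rw [hcurA, h2]
            rw [PySem.List.pyGetD_natCast]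
            rw [List.getD_eq_getElem _ _ (by simpa using hj)]
            simp [hv]
          have hpop : PySem.List.pop? und curA = some (((v : Nat) : Int), und.eraseIdx curA.toNat) := by
            conv_lhs => rw [hcurA]
            rw [PySem.List.pop?_natCast und curA.toNat (by omega)]
            have hq : und[curA.toNat]'(by omega) = ((v : Nat) : Int) := by
              have hq' : und[curA.toNat]? = some ((v : Nat) : Int) := by
                rw [h2]
                simp [hj, hv]
              simpa [List.getElem?_eq_getElem (show curA.toNat < und.length by omega)] using hq'
            rw [hq]
          rw [hk', hget, hpop]
          simp only [Option.map_some, Option.getD_some]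
          rw [hrowv] at hpre
          have hlen' : ((und.eraseIdx curA.toNat).length : Int) = cnt - 1 := by
            rw [List.length_eraseIdx_of_lt (by omega)]
            rw [h5]
            push_cast [hlen]
            omega
          rw [hlen']
          have hsetf : aliveNat (alive.set v false) = (aliveNat alive).eraseIdx curA.toNat := by
            have := aliveNat_set_false alive curA.toNat hj
            rwa [hv] at this
          have halive' : PySem.List.pySetD alive ((v : Nat) : Int) false = alive.set v false := by
            rw [PySem.List.pySetD_of_nonneg _ _ (by positivity)]
            simp
          rw [halive']
          have hvnotin : ((v : Nat) : Int) ∉ rem := by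
            intro hmem
            have := (h7 v hvlt).mpr hmem
            rw [hvtrue] at this
            simp at this
          refine ⟨⟨?_, ?_, ?_, rfl, ?_, ?_, ?_, ?_, ?_⟩, hpre⟩
          · -- answer
            rw [PySem.List.pySetD_of_nonneg _ _ (by positivity)]
            simp only [Int.toNat_natCast]
            rw [h1, List.map_set]
            rfl
          · -- undeleted
            rw [hsetf, h2, List.eraseIdx_map]
          · -- deleted stack values
            simp [h3]
          · -- count
            rw [hsetf, List.length_eraseIdx_of_lt hj, h5]
            push_cast
            omega
          · -- stack invariant
            rw [List.reverse_append, List.reverse_singleton, List.singleton_append]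
            refine ⟨by positivity, ?_, ?_, ?_, ?_⟩
            · simpa using hvlt
            · simpa using List.getElem?_set_self (by simpa using hvlt : (v : Nat) < alive.length)
            · rw [Int.toNat_natCast, take_set]
              have := aliveNat_count_take alive curA.toNat hj
              rw [hv] at this
              rw [this, ← hcurA]
            · rw [Int.toNat_natCast, List.set_set, set_of_getElem? alive _ _ hvtrue]
              exact h6
          · -- membership invariant
            intro i hi
            rw [List.length_set] at hi
            by_cases hiv : i = v
            · subst hiv
              simp [List.getElem?_set_self (by simpa using hvlt : i < alive.length)]
            · rw [List.getElem?_set_ne (by omega)]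
              rw [h7 i hi]
              simp only [List.mem_append, List.mem_singleton]
              constructor
              · exact Or.inl
              · rintro (h | h)
                · exact h
                · exfalso
                  exact hiv (by exact_mod_cast h)
          · -- nodup
            rw [List.nodup_append]
            refine ⟨h8, by simp, ?_⟩
            intro x hx y hy
            simp only [List.mem_singleton] at hy
            subst hy
            intro he
            exact hvnotin (he ▸ hx)
          · -- nonneg
            intro r hr
            rcases List.mem_append.mp hr with h | h
            · exact h9 r h
            · simp only [List.mem_singleton] at h
              subst h
              positivity
        · rw [if_neg hcnd] at hpre
          simp at hpre
      · by_cases hZ : PySem.List.pyGetD ((PySem.Str.split? command " ").getD []) 0 "" = "Z"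
        · -- 'Z'
          simp only [hZ] at hpre ⊢
          simp only [String.reduceEq, or_self, if_true, if_false] at hpre ⊢
          rcases hg : rem.getLast? with _ | vI <;> rw [hg] at hpre <;> simp only [] at hpre
          · exact absurd hpre (by simp)
          · have hdne : del ≠ [] := by
              intro h0
              rw [h0] at h3
              simp only [List.map_nil] at h3
              rw [← h3] at hg
              simp at hg
            have hrne : rem ≠ [] := by
              intro h0
              rw [h0] at hg
              simp at hg
            have hdel : del.dropLast ++ [del.getLast hdne] = del := List.dropLast_append_getLast hdne
            have hlastfst : (del.getLast hdne).1 = vI := by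
              rw [← h3, List.getLast?_map, List.getLast?_eq_some_getLast hdne] at hg
              simpa using hg
            obtain ⟨pI, hvp⟩ : ∃ p, del.getLast hdne = (vI, p) := by
              refine ⟨(del.getLast hdne).2, ?_⟩
              rw [← hlastfst]
            have hrem : rem.dropLast ++ [vI] = rem := by
              have h' := List.dropLast_append_getLast hrne
              have hglast := hg
              rw [List.getLast?_eq_some_getLast hrne] at hglast
              have hh := Option.some.inj hglast
              rw [hh] at h'
              exact h'
            have hpop : PySem.List.pop? del (-1) = some ((vI, pI), del.dropLast) := by
              have hthis := PySem.List.pop?_last del.dropLast (del.getLast hdne)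
              rw [hdel, hvp] at hthis
              exact hthis
            rw [hpop]
            simp only []
            have h6' : StackInvR alive ((vI, pI) :: del.dropLast.reverse) := by
              rw [← hdel, List.reverse_append] at h6
              simpa [hvp] using h6
            obtain ⟨hv0, hvlt, hvfalse, hp, hrest⟩ := h6'
            have hrownotdrop : vI ∉ rem.dropLast := by
              intro hmem
              have hnd := h8
              rw [← hrem] at hnd
              rw [List.nodup_append] at hnd
              exact hnd.2.2 vI hmem vI (by simp) rfl
            have hsett := aliveNat_set_true alive vI.toNat hvlt hvfalse
            have hple : (alive.take vI.toNat).count true ≤ (aliveNat alive).length := by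
              rw [aliveNat_length]
              exact (List.take_sublist _ _).count_le _
            have hinsert : PySem.List.insert und pI vI =
                und.take ((alive.take vI.toNat).count true) ++
                  vI :: und.drop ((alive.take vI.toNat).count true) := by
              rw [hp, PySem.List.insert_natCast und _ vI (by rw [h2]; simpa using hple)]
            have halive' : PySem.List.pySetD alive vI true = alive.set vI.toNat true := by
              rw [PySem.List.pySetD_of_nonneg _ _ hv0]
            rw [hinsert, halive']
            refine ⟨⟨?_, ?_, ?_, rfl, ?_, hrest, ?_, ?_, ?_⟩, ?_⟩
            · -- answer
              rw [PySem.List.pySetD_of_nonneg _ _ hv0, h1, List.map_set]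
              rfl
            · -- undeleted
              rw [hsett, h2]
              simp only [List.map_append, List.map_cons, List.map_take, List.map_drop]
              rw [Int.toNat_of_nonneg hv0]
            · -- deleted stack values
              rw [← h3, List.map_dropLast]
            · -- count
              rw [hsett, h5]
              simp only [List.length_append, List.length_cons, List.length_take, List.length_drop]
              push_cast
              omega
            · -- membership invariant
              intro i hi
              rw [List.length_set] at hi
              have hmemsplit : ((i : Nat) : Int) ∈ rem ↔
                  ((i : Nat) : Int) ∈ rem.dropLast ∨ ((i : Nat) : Int) = vI := by
                conv_lhs => rw [← hrem]
                simp
              by_cases hiv : i = vI.toNat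
              · rw [hiv, List.getElem?_set_self (by omega)]
                simp only [reduceCtorEq, Bool.true_eq_false, Option.some.injEq, false_iff]
                intro hmem
                have hcast : ((vI.toNat : Nat) : Int) = vI := by omega
                rw [hcast] at hmem
                exact hrownotdrop hmem
              · rw [List.getElem?_set_ne (by omega)]
                rw [h7 i hi, hmemsplit]
                constructor
                · rintro (h | h)
                  · exact h
                  · exact absurd (by omega : i = vI.toNat) hiv
                · exact Or.inl
            · -- nodup
              exact h8.sublist (List.dropLast_sublist _)
            · -- nonneg
              intro r hr
              exact h9 r (List.dropLast_subset _ hr)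
            · -- precondition for the rest
              exact hpre
        · -- unrecognized command: no-op
          simp only [if_neg hnUD, if_neg hU, if_neg hD, if_neg hC, if_neg hZ] at hpre ⊢
          exact ⟨⟨h1, h2, h3, rfl, h5, h6, h7, h8, h9⟩, hpre⟩

theorem fold_rel (cmd : List String) (a : List String × List Int × List (Int × Int) × Int)
    (b : List Bool × List Int × Int × Int)
    (hrel : SimRel a b) (hpre : preOk b.2.2.1 b.2.2.2 b.2.1 cmd = true) :
    SimRel (cmd.foldl solAStep a) (cmd.foldl solBStep b) := by
  induction cmd generalizing a b with
  | nil => simpa using hrel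
  | cons command rest ih =>
    obtain ⟨hstep1, hstep2⟩ := step_rel a b command rest hrel hpre
    simpa using ih _ _ hstep1 hstep2

theorem init_rel (n k : Int) :
    SimRel ((PySem.List.pyRange 0 n 1).map (fun _ => "O"), PySem.List.pyRange 0 n 1, [], k)
      (List.replicate n.toNat true, [], k, ((List.replicate n.toNat true).length : Int)) := by
  have hrange : PySem.List.pyRange 0 n 1 = (List.range n.toNat).map (fun (m : Nat) => (m : Int)) := by
    by_cases hn : n ≤ 0
    · have h0 : n.toNat = 0 := by omega
      rw [h0]
      simp only [List.range_zero]
      simp [PySem.List.pyRange]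
      omega
    · have h : n = ((n.toNat : Nat) : Int) := by omega
      rw [h, PySem.List.pyRange_zero_natCast]
      have hmax : (max n 0).toNat = n.toNat := by omega
      simp [hmax]
  refine ⟨?_, ?_, rfl, rfl, ?_, trivial, ?_, List.nodup_nil, by simp⟩
  · rw [hrange, List.map_map]
    simp [Function.comp_def]
  · simp [hrange, aliveNat_replicate]
  · simp [aliveNat_replicate]
  · intro i hi
    simp only [List.getElem?_replicate, List.length_replicate] at hi ⊢
    simp [hi]

-- ===== VERDICT (by name: the statement is the Claim_ definition above) =====
theorem solution_spec : Claim_equal_solution := by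
  intro n k cmd _hdom hpre
  unfold Spec_solution solution solution_alt
  have h := fold_rel cmd _ _ (init_rel n k) (by unfold Pre_solution at hpre; simpa using hpre)
  simp only [SimRel] at h
  simp only [h.1]
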